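-- pv_equiv track=rewrite | github.com/namu-k/picko-scripts | picko/multimedia_io.py | _parse_body_sections
-- ===== SOURCE A (Python) =====
-- def _parse_body_sections(body: str) -> dict[str, str]:
--     """Parse markdown body into sections."""
--     sections: dict[str, str] = {}
--     current_header: str | None = None
--     current_content: list[str] = []
--
--     for line in body.split("\n"):
--         if line.startswith("## "):
--             if current_header:
--                 sections[current_header] = "\n".join(current_content).strip()
--             current_header = line[3:].strip()
--             current_content = []
--         elif current_header:
--             current_content.append(line)
--
--     if current_header:
--         sections[current_header] = "\n".join(current_content).strip()
--
--     return sections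
-- ===== SOURCE B (Python) =====
-- def _parse_body_sections(body: str) -> dict[str, str]:
--     """Parse markdown body into sections (index-based: find header positions, then slice)."""
--     lines = body.split("\n")
--     heads = [i for i, line in enumerate(lines) if line.startswith("## ")]
--     sections: dict[str, str] = {}
--     for i, j in zip(heads, heads[1:] + [len(lines)]):
--         key = lines[i][3:].strip()
--         if key:
--             sections[key] = "\n".join(lines[i + 1 : j]).strip()
--     return sections
-- ===== Notes on version B (the rewrite author's own statement) =====
-- stated objective: alternative
-- what changed: Replaces A's single-pass state machine (pending header + accumulated content lines + flush logic) by an index-based tokenization: first collect the indices of all header lines, then zip consecutive header positions and build each section directly by slicing the line list between them.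
import Mathlib
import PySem

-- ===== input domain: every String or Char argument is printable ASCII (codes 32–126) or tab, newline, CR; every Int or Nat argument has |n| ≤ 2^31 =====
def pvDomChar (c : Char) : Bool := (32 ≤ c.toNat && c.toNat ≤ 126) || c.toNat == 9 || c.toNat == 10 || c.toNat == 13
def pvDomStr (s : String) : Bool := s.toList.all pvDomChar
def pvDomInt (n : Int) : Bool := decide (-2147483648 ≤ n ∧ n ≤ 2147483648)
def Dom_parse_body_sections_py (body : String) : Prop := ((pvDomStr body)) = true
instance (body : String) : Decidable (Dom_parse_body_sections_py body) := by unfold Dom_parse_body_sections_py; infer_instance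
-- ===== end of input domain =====

-- B replaces A's single-pass state machine (pending header, accumulated content, flush logic)
-- by an index-based tokenization: collect the indices of all header lines, then slice the line
-- list between consecutive header positions (objective: alternative; same O(n) cost).

-- ===== PORT A =====
-- loop body of A's 'for line in body.split("\n")' (state = (sections, current_header, current_content))
def pvAStep (st : PySem.Dict String String × Option String × List String) (line : String) :
    PySem.Dict String String × Option String × List String :=
  if PySem.Str.startswith line "## " then
    -- 'if current_header:' — truthiness of Optional[str]: None and "" are falsy
    let sections := if (st.2.1.getD "") ≠ "" then
        st.1.insert (st.2.1.getD "") (PySem.Str.strip (PySem.Str.join "\n" st.2.2)) else st.1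
    (sections, some (PySem.Str.strip (PySem.Str.slice line (some 3) none)), [])
  else if (st.2.1.getD "") ≠ "" then (st.1, st.2.1, st.2.2 ++ [line])
  else st

-- the trailing 'if current_header: sections[current_header] = ...'
def pvAFlush (st : PySem.Dict String String × Option String × List String) :
    PySem.Dict String String :=
  if (st.2.1.getD "") ≠ "" then
    st.1.insert (st.2.1.getD "") (PySem.Str.strip (PySem.Str.join "\n" st.2.2)) else st.1

def parse_body_sections_py (body : String) : List (String × String) :=
  (pvAFlush (((PySem.Str.split? body "\n").getD []).foldl pvAStep
      (PySem.Dict.empty, none, []))).items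

-- ===== PORT B =====
-- loop body of B's 'for i, j in zip(heads, heads[1:] + [len(lines)])'
-- (lines[i] ported with pyGetD: every i comes from enumerate(lines), so it is in range)
def pvBStep (lines : List String) (sections : PySem.Dict String String) (ij : Int × Int) :
    PySem.Dict String String :=
  let key := PySem.Str.strip (PySem.Str.slice (PySem.List.pyGetD lines ij.1 "") (some 3) none)
  if key ≠ "" then
    sections.insert key (PySem.Str.strip (PySem.Str.join "\n"
      (PySem.List.slice lines (some (ij.1 + 1)) (some ij.2))))
  else sections

def parse_body_sections_py_alt (body : String) : List (String × String) :=
  let lines := (PySem.Str.split? body "\n").getD []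
  let heads := ((PySem.List.enumerate lines).filter
      (fun p => PySem.Str.startswith p.2 "## ")).map (fun p => p.1)
  let bounds := heads.zip (heads.tail ++ [(lines.length : Int)])
  (bounds.foldl (pvBStep lines) PySem.Dict.empty).items

-- ===== PRECONDITION & SPEC =====
def Spec_parse_body_sections_py (body : String) (out : List (String × String)) : Prop := out = parse_body_sections_py_alt body
instance (body : String) (out : List (String × String)) : Decidable (Spec_parse_body_sections_py body out) := by unfold Spec_parse_body_sections_py; infer_instance

-- ===== CLAIM (what is proved, stated in full; the proofs are below) =====
def Claim_equal_parse_body_sections_py : Prop := ∀ (body : String), Dom_parse_body_sections_py body → Spec_parse_body_sections_py body (parse_body_sections_py body)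

-- ===== LEMMAS AND PROOFS =====

-- common reference semantics: process the line list header-chunk by header-chunk
def pvChunk (d : PySem.Dict String String) : List String → PySem.Dict String String
  | [] => d
  | l :: rest =>
    if PySem.Str.startswith l "## " then
      let key := PySem.Str.strip (PySem.Str.slice l (some 3) none)
      pvChunk (if key ≠ "" then
          d.insert key (PySem.Str.strip (PySem.Str.join "\n"
            (rest.takeWhile (fun x => !PySem.Str.startswith x "## ")))) else d)
        (rest.dropWhile (fun x => !PySem.Str.startswith x "## "))
    else pvChunk d rest
termination_by ls => ls.length
decreasing_by
  · have := List.length_dropWhile_le (fun x => !PySem.Str.startswith x "## ") rest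
    simpa using Nat.lt_succ_of_le this
  · simp

-- ---------- A-side: the state machine computes pvChunk ----------

lemma pvAStep_head (st : PySem.Dict String String × Option String × List String)
    (l : String) (hH : PySem.Str.startswith l "## " = true) :
    pvAStep st l =
      ((if (st.2.1.getD "") ≠ "" then
          st.1.insert (st.2.1.getD "") (PySem.Str.strip (PySem.Str.join "\n" st.2.2)) else st.1),
        some (PySem.Str.strip (PySem.Str.slice l (some 3) none)), []) := by
  unfold pvAStep
  rw [if_pos hH]

lemma pvAStep_other (st : PySem.Dict String String × Option String × List String)
    (l : String) (hH : ¬ PySem.Str.startswith l "## " = true) :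
    pvAStep st l =
      (if (st.2.1.getD "") ≠ "" then (st.1, st.2.1, st.2.2 ++ [l]) else st) := by
  unfold pvAStep
  rw [if_neg hH]

lemma pvChunk_nil (d : PySem.Dict String String) : pvChunk d [] = d := by
  rw [pvChunk.eq_def]

lemma pvChunk_cons (d : PySem.Dict String String) (l : String) (rest : List String) :
    pvChunk d (l :: rest) =
      (if PySem.Str.startswith l "## " then
        pvChunk (if PySem.Str.strip (PySem.Str.slice l (some 3) none) ≠ "" then
            d.insert (PySem.Str.strip (PySem.Str.slice l (some 3) none))
              (PySem.Str.strip (PySem.Str.join "\n"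
                (rest.takeWhile (fun x => !PySem.Str.startswith x "## ")))) else d)
          (rest.dropWhile (fun x => !PySem.Str.startswith x "## "))
      else pvChunk d rest) := by
  rw [pvChunk.eq_def]

lemma pvA_run (ls : List String) : ∀ (d : PySem.Dict String String) (key : String) (c : List String),
    pvAFlush (ls.foldl pvAStep (d, some key, c)) =
    pvChunk (if key ≠ "" then
        d.insert key (PySem.Str.strip (PySem.Str.join "\n"
          (c ++ ls.takeWhile (fun x => !PySem.Str.startswith x "## ")))) else d)
      (ls.dropWhile (fun x => !PySem.Str.startswith x "## ")) := by
  induction ls with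
  | nil =>
    intro d key c
    simp only [List.foldl_nil, List.takeWhile_nil, List.dropWhile_nil, List.append_nil,
      pvChunk_nil, pvAFlush, Option.getD_some]
  | cons l ls ih =>
    intro d key c
    by_cases hH : PySem.Str.startswith l "## " = true
    · rw [List.foldl_cons, pvAStep_head _ _ hH, ih]
      rw [List.takeWhile_cons, List.dropWhile_cons]
      simp only [hH, Bool.not_true, Bool.false_eq_true, reduceIte, Option.getD_some,
        List.append_nil, pvChunk_cons, List.nil_append]
    · rw [List.foldl_cons, pvAStep_other _ _ hH]
      rw [List.takeWhile_cons, List.dropWhile_cons]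
      have hHb : PySem.Str.startswith l "## " = false := by
        simpa using hH
      simp only [hHb, Bool.not_false, reduceIte, Option.getD_some]
      by_cases hk : key = ""
      · simp only [hk, ne_eq, not_true_eq_false, reduceIte, ih]
      · simp only [hk, ne_eq, not_false_eq_true, reduceIte, ih,
          List.append_assoc, List.cons_append, List.nil_append]

lemma pvA_start (ls : List String) : ∀ (d : PySem.Dict String String),
    pvAFlush (ls.foldl pvAStep (d, none, [])) = pvChunk d ls := by
  induction ls with
  | nil =>
    intro d
    simp only [List.foldl_nil, pvChunk_nil, pvAFlush, Option.getD_none, ne_eq,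
      not_true_eq_false, reduceIte]
  | cons l ls ih =>
    intro d
    by_cases hH : PySem.Str.startswith l "## " = true
    · rw [List.foldl_cons, pvAStep_head _ _ hH]
      simp only [Option.getD_none, ne_eq, not_true_eq_false, reduceIte]
      rw [pvA_run, pvChunk_cons]
      simp only [hH, reduceIte, List.nil_append]
    · rw [List.foldl_cons, pvAStep_other _ _ hH]
      simp only [Option.getD_none, ne_eq, not_true_eq_false, reduceIte]
      rw [ih, pvChunk_cons]
      have hHb : PySem.Str.startswith l "## " = false := by simpa using hH
      simp only [hHb, Bool.false_eq_true, reduceIte]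

-- ---------- B-side: header indices ----------

def pvHeads : List String → List Nat
  | [] => []
  | l :: rest =>
    if PySem.Str.startswith l "## " then 0 :: (pvHeads rest).map (· + 1)
    else (pvHeads rest).map (· + 1)

def pvPairs (ls : List String) : List (Nat × Nat) :=
  (pvHeads ls).zip ((pvHeads ls).tail ++ [ls.length])

lemma pvHeads_cons_head (l : String) (rest : List String)
    (hH : PySem.Str.startswith l "## " = true) :
    pvHeads (l :: rest) = 0 :: (pvHeads rest).map (· + 1) := by
  conv_lhs => rw [pvHeads.eq_def]
  dsimp only
  rw [if_pos hH]

lemma pvHeads_cons_other (l : String) (rest : List String)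
    (hH : ¬ PySem.Str.startswith l "## " = true) :
    pvHeads (l :: rest) = (pvHeads rest).map (· + 1) := by
  conv_lhs => rw [pvHeads.eq_def]
  dsimp only
  rw [if_neg hH]

lemma pvEnum_nil (k : Int) : PySem.List.enumerate ([] : List String) k = [] := rfl

lemma pvEnum_cons (x : String) (t : List String) (k : Int) :
    PySem.List.enumerate (x :: t) k = (k, x) :: PySem.List.enumerate t (k + 1) := rfl

lemma pvMapShift (hs : List Nat) (k : Int) :
    (hs.map (· + 1)).map (fun n : Nat => (n : Int) + k) = hs.map (fun n : Nat => (n : Int) + (k + 1)) := by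
  rw [List.map_map]
  have hfun : ((fun n : Nat => (n : Int) + k) ∘ (· + 1)) =
      (fun n : Nat => (n : Int) + (k + 1)) := by
    funext n
    simp only [Function.comp_apply]
    push_cast
    ring
  rw [hfun]

lemma pvHeads_enumerate (ls : List String) : ∀ (k : Int),
    ((PySem.List.enumerate ls k).filter (fun p => PySem.Str.startswith p.2 "## ")).map
        (fun p => p.1) =
      (pvHeads ls).map (fun n : Nat => (n : Int) + k) := by
  induction ls with
  | nil => intro k; rw [pvEnum_nil]; rfl
  | cons l ls ih =>
    intro k
    rw [pvEnum_cons, List.filter_cons]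
    by_cases hH : PySem.Str.startswith l "## " = true
    · rw [pvHeads_cons_head l ls hH]
      simp only [hH, reduceIte, List.map_cons, ih (k + 1), pvMapShift, Nat.cast_zero, zero_add]
    · have hHb : PySem.Str.startswith l "## " = false := by simpa using hH
      rw [pvHeads_cons_other l ls hH]
      simp only [hHb, Bool.false_eq_true, reduceIte, ih (k + 1), pvMapShift]

-- first header position = length of the header-free prefix
lemma pvHeads_headD (ls : List String) :
    (pvHeads ls).headD ls.length =
      (ls.takeWhile (fun x => !PySem.Str.startswith x "## ")).length := by
  induction ls with
  | nil => rfl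
  | cons l ls ih =>
    by_cases hH : PySem.Str.startswith l "## " = true
    · rw [pvHeads_cons_head l ls hH, List.takeWhile_cons]
      simp only [hH, Bool.not_true, Bool.false_eq_true, reduceIte, List.headD_cons,
        List.length_nil]
    · have hHb : PySem.Str.startswith l "## " = false := by simpa using hH
      rw [pvHeads_cons_other l ls hH, List.takeWhile_cons]
      simp only [hHb, Bool.not_false, reduceIte, List.length_cons]
      cases h : pvHeads ls with
      | nil =>
        simp only [h, List.headD_nil] at ih
        simp only [List.map_nil, List.headD_nil, ih]
      | cons a t =>
        simp only [h, List.headD_cons] at ih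
        simp only [List.map_cons, List.headD_cons, ih]

lemma pvTakeWhile_take (p : String → Bool) (ls : List String) :
    ls.take (ls.takeWhile p).length = ls.takeWhile p := by
  induction ls with
  | nil => rfl
  | cons l ls ih =>
    rw [List.takeWhile_cons]
    cases hp : p l
    · simp only [Bool.false_eq_true, reduceIte, List.length_nil, List.take_zero]
    · simp only [reduceIte, List.length_cons, List.take_succ_cons, ih]

lemma pvTake_headD (ls : List String) :
    ls.take ((pvHeads ls).headD ls.length) =
      ls.takeWhile (fun x => !PySem.Str.startswith x "## ") := by
  rw [pvHeads_headD, pvTakeWhile_take]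

lemma pvZipShift (A B : List Nat) :
    (A.map (· + 1)).zip (B.map (· + 1)) = (A.zip B).map (fun p => (p.1 + 1, p.2 + 1)) := by
  rw [List.zip_map]
  have h : Prod.map (fun n : Nat => n + 1) (fun n : Nat => n + 1) =
      (fun p : Nat × Nat => (p.1 + 1, p.2 + 1)) := by
    funext p; cases p; rfl
  rw [h]

lemma pvZipCast (A B : List Nat) :
    (A.map (fun n : Nat => (n : Int))).zip (B.map (fun n : Nat => (n : Int))) =
      (A.zip B).map (fun p => (((p.1 : Nat) : Int), ((p.2 : Nat) : Int))) := by
  rw [List.zip_map]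
  have h : Prod.map (fun n : Nat => (n : Int)) (fun n : Nat => (n : Int)) =
      (fun p : Nat × Nat => (((p.1 : Nat) : Int), ((p.2 : Nat) : Int))) := by
    funext p; cases p; rfl
  rw [h]

lemma pvMapAppendOne (t : List Nat) (m : Nat) :
    t.map (· + 1) ++ [m + 1] = (t ++ [m]).map (· + 1) := by
  simp only [List.map_append, List.map_cons, List.map_nil]

lemma pvPairs_cons_not (l : String) (rest : List String)
    (hH : ¬ PySem.Str.startswith l "## " = true) :
    pvPairs (l :: rest) = (pvPairs rest).map (fun p => (p.1 + 1, p.2 + 1)) := by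
  unfold pvPairs
  rw [pvHeads_cons_other l rest hH, List.length_cons]
  cases h : pvHeads rest with
  | nil => rfl
  | cons a t =>
    simp only [List.map_cons, List.tail_cons]
    rw [pvMapAppendOne, show ((a + 1) :: t.map (· + 1)) = (a :: t).map (· + 1) from rfl,
      pvZipShift]

lemma pvPairs_cons_head (l : String) (rest : List String)
    (hH : PySem.Str.startswith l "## " = true) :
    pvPairs (l :: rest) =
      (0, (pvHeads rest).headD rest.length + 1) ::
        (pvPairs rest).map (fun p => (p.1 + 1, p.2 + 1)) := by
  unfold pvPairs
  rw [pvHeads_cons_head l rest hH, List.length_cons]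
  cases h : pvHeads rest with
  | nil => rfl
  | cons a t =>
    simp only [List.map_cons, List.tail_cons, List.headD_cons, List.cons_append,
      List.zip_cons_cons]
    rw [pvMapAppendOne, show ((a + 1) :: t.map (· + 1)) = (a :: t).map (· + 1) from rfl,
      pvZipShift]

-- a fold over shifted pairs on (l :: rest) is the fold over the pairs on rest
lemma pvFold_shift (l : String) (rest : List String) (ps : List (Nat × Nat)) :
    ∀ (d : PySem.Dict String String),
    (ps.map (fun p => (((p.1 : Nat) : Int) + 1, ((p.2 : Nat) : Int) + 1))).foldl
        (pvBStep (l :: rest)) d =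
      (ps.map (fun p => (((p.1 : Nat) : Int), ((p.2 : Nat) : Int)))).foldl (pvBStep rest) d := by
  induction ps with
  | nil => intro d; simp only [List.map_nil, List.foldl_nil]
  | cons p ps ih =>
    intro d
    simp only [List.map_cons, List.foldl_cons]
    rw [ih]
    have hstep : pvBStep (l :: rest) d (((p.1 : Nat) : Int) + 1, ((p.2 : Nat) : Int) + 1) =
        pvBStep rest d (((p.1 : Nat) : Int), ((p.2 : Nat) : Int)) := by
      unfold pvBStep
      have h1 : ((p.1 : Int) + 1) = ((p.1 + 1 : Nat) : Int) := by omega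
      have h2 : ((p.2 : Int) + 1) = ((p.2 + 1 : Nat) : Int) := by omega
      have h4 : (((p.1 + 1 : Nat) : Int) + 1) = ((p.1 + 2 : Nat) : Int) := by omega
      simp only [h1, h2, h4, PySem.List.pyGetD_natCast, PySem.List.slice_natCast]
      have hg : (l :: rest).getD (p.1 + 1) "" = rest.getD p.1 "" := by
        simp only [List.getD_cons_succ]
      have hs : (p.2 + 1) - (p.1 + 2) = p.2 - (p.1 + 1) := by omega
      have hd : (l :: rest).drop (p.1 + 2) = rest.drop (p.1 + 1) := by
        rw [List.drop_succ_cons]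
      rw [hg, hs, hd]
    rw [hstep]

lemma pvChunk_dropWhile (ls : List String) : ∀ (d : PySem.Dict String String),
    pvChunk d (ls.dropWhile (fun x => !PySem.Str.startswith x "## ")) = pvChunk d ls := by
  induction ls with
  | nil => intro d; rfl
  | cons l ls ih =>
    intro d
    rw [List.dropWhile_cons]
    by_cases hH : PySem.Str.startswith l "## " = true
    · simp only [hH, Bool.not_true, Bool.false_eq_true, reduceIte]
    · have hHb : PySem.Str.startswith l "## " = false := by simpa using hH
      simp only [hHb, Bool.not_false, reduceIte]
      rw [ih, pvChunk_cons]
      simp only [hHb, Bool.false_eq_true, reduceIte]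

lemma pvB_run (ls : List String) : ∀ (d : PySem.Dict String String),
    ((pvPairs ls).map (fun p => (((p.1 : Nat) : Int), ((p.2 : Nat) : Int)))).foldl
        (pvBStep ls) d = pvChunk d ls := by
  induction ls with
  | nil =>
    intro d
    unfold pvPairs
    rw [show pvHeads [] = [] from by rw [pvHeads.eq_def]]
    simp only [List.zip_nil_left, List.map_nil, List.foldl_nil, pvChunk_nil]
  | cons l ls ih =>
    intro d
    have hcomp :
        ((fun p : Nat × Nat => (((p.1 : Nat) : Int), ((p.2 : Nat) : Int))) ∘
          (fun p : Nat × Nat => (p.1 + 1, p.2 + 1))) =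
        (fun p : Nat × Nat => (((p.1 : Nat) : Int) + 1, ((p.2 : Nat) : Int) + 1)) := by
      funext p
      simp only [Function.comp_apply, Prod.mk.injEq]
      exact ⟨by push_cast; ring, by push_cast; ring⟩
    by_cases hH : PySem.Str.startswith l "## " = true
    · rw [pvPairs_cons_head l ls hH]
      simp only [List.map_cons, List.foldl_cons, List.map_map, hcomp]
      rw [pvFold_shift, ih]
      -- compute the first step
      have hstep : pvBStep (l :: ls) d
          (((0 : Nat) : Int), (((pvHeads ls).headD ls.length + 1 : Nat) : Int)) =
          (if PySem.Str.strip (PySem.Str.slice l (some 3) none) ≠ "" then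
            d.insert (PySem.Str.strip (PySem.Str.slice l (some 3) none))
              (PySem.Str.strip (PySem.Str.join "\n"
                (ls.takeWhile (fun x => !PySem.Str.startswith x "## ")))) else d) := by
        unfold pvBStep
        have h1 : (((0 : Nat) : Int) + 1) = ((1 : Nat) : Int) := by omega
        simp only [h1, PySem.List.pyGetD_natCast, PySem.List.slice_natCast]
        have hg : (l :: ls).getD 0 "" = l := rfl
        have hd : (l :: ls).drop 1 = ls := rfl
        have hs : ((pvHeads ls).headD ls.length + 1) - 1 = (pvHeads ls).headD ls.length := by
          omega
        rw [hg, hd, hs, pvTake_headD]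
      rw [hstep, ← pvChunk_dropWhile ls, pvChunk_cons]
      simp only [hH, reduceIte]
    · have hHb : PySem.Str.startswith l "## " = false := by simpa using hH
      rw [pvPairs_cons_not l ls hH]
      simp only [List.map_map, hcomp]
      rw [pvFold_shift, ih, pvChunk_cons]
      simp only [hHb, Bool.false_eq_true, reduceIte]

-- B's Int-valued bounds list is the Nat pair list, cast
lemma pvBounds_eq (ls : List String) :
    (((pvHeads ls).map (fun n : Nat => (n : Int))).zip
        (((pvHeads ls).map (fun n : Nat => (n : Int))).tail ++ [(ls.length : Int)])) =
      (pvPairs ls).map (fun p => (((p.1 : Nat) : Int), ((p.2 : Nat) : Int))) := by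
  unfold pvPairs
  cases h : pvHeads ls with
  | nil => rfl
  | cons a t =>
    simp only [List.map_cons, List.tail_cons]
    have hap : t.map (fun n : Nat => (n : Int)) ++ [(ls.length : Int)] =
        (t ++ [ls.length]).map (fun n : Nat => (n : Int)) := by
      simp only [List.map_append, List.map_cons, List.map_nil]
    rw [hap, show ((a : Int) :: t.map (fun n : Nat => (n : Int))) =
      (a :: t).map (fun n : Nat => (n : Int)) from rfl, pvZipCast]

-- ===== VERDICT (by name: the statement is the Claim_ definition above) =====
theorem parse_body_sections_py_spec : Claim_equal_parse_body_sections_py := by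
  intro body _
  unfold Spec_parse_body_sections_py
  simp only [parse_body_sections_py, parse_body_sections_py_alt]
  congr 1
  rw [pvA_start]
  have he : ((PySem.List.enumerate ((PySem.Str.split? body "\n").getD []) 0).filter
      (fun p => PySem.Str.startswith p.2 "## ")).map (fun p => p.1) =
      (pvHeads ((PySem.Str.split? body "\n").getD [])).map (fun n : Nat => (n : Int)) := by
    have h := pvHeads_enumerate ((PySem.Str.split? body "\n").getD []) 0
    simpa only [add_zero] using h
  rw [he, pvBounds_eq, pvB_run]
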